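-- pv_equiv track=rewrite | github.com/ankitgupta0910/FileShufflingBerkeley | test.py | overLappedStringLength
-- ===== SOURCE A (Python) =====
-- def overLappedStringLength(s1, s2):
--     t = []
--     if len(s1) > len(s2):
--         s1 = s1[len(s1) - len(s2):]
--
--     t = computeBackTrackTable(s2)
--     if t is not None:
--         m = 0
--         i = 0
--         while m + i < len(s1):
--             if s2[i] is s1[m + i]:
--                 i += 1
--             else:
--                 m += i - t[i]
--                 if i > 0:
--                     i = t[i]
--
--         return i
--     else:
--         return False
--
-- def computeBackTrackTable(s):
--     t = []
--     cnd = 0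
--     t.insert(0, -1)
--     t.insert(1, 0)
--     pos = 2
--     while pos < len(s):
--         if s[pos - 1] is s[cnd]:
--             t.insert(pos, cnd+1)
--             pos += 1
--             cnd += 1
--         elif cnd > 0:
--             cnd = t[cnd]
--         else:
--             t.insert(pos,0)
--             # t[pos] = 0
--             pos += 1
--
--     return t
-- ===== SOURCE B (Python) =====
-- def overLappedStringLength(s1, s2):
--     if len(s1) > len(s2):
--         s1 = s1[len(s1) - len(s2):]
--     n = len(s1)
--     for L in range(n, 0, -1):
--         off = n - L
--         # 'is' on one-char strings matches A's comparison semantics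
--         if all(s1[off + j] is s2[j] for j in range(L)):
--             return L
--     return 0
-- ===== Notes on version B (the rewrite author's own statement) =====
-- stated objective: simpler
-- what changed: Replaced the KMP failure-table construction plus table-driven scan with a direct descending scan that tests each candidate overlap length once and returns the first match.
import Mathlib
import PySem

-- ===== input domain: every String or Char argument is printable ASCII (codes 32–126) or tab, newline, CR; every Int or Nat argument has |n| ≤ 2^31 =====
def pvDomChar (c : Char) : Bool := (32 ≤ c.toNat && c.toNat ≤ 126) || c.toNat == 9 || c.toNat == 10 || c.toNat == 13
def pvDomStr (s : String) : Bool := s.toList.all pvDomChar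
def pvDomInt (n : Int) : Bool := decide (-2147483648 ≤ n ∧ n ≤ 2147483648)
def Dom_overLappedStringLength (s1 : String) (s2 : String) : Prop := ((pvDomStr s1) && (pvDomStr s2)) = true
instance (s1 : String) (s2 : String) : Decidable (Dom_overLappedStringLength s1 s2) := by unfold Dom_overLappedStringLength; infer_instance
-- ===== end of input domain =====

-- B replaces A's KMP failure-table build + table-driven scan with a direct descending scan
-- over candidate overlap lengths (simpler, not faster). Python's 'is' on one-char strings is
-- ported as character equality (exact on the ASCII input domain, where CPython interns them).

-- ===== PORT A =====
def pvIdx (t : List Int) (i : Int) : Int := (PySem.List.pyGet? t i).getD 0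
def pvChr (s : List Char) (i : Int) : Char := (PySem.List.pyGet? s i).getD ' '

def pvTblLoop (s : List Char) : Nat → List Int → Int → Int → List Int
  | 0, t, _, _ => t
  | fuel+1, t, cnd, pos =>
    if pos < (s.length : Int) then
      if pvChr s (pos - 1) = pvChr s cnd then
        pvTblLoop s fuel (PySem.List.insert t pos (cnd + 1)) (cnd + 1) (pos + 1)
      else if cnd > 0 then
        pvTblLoop s fuel t (pvIdx t cnd) pos
      else
        pvTblLoop s fuel (PySem.List.insert t pos 0) cnd (pos + 1)
    else t

def computeBackTrackTable (s : List Char) : List Int :=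
  pvTblLoop s (2 * s.length + 1) (PySem.List.insert (PySem.List.insert [] 0 (-1)) 1 0) 0 2

def pvKmpLoop (a b : List Char) (t : List Int) : Nat → Int → Int → Int
  | 0, _, i => i
  | fuel+1, m, i =>
    if m + i < (a.length : Int) then
      if pvChr b i = pvChr a (m + i) then
        pvKmpLoop a b t fuel m (i + 1)
      else
        pvKmpLoop a b t fuel (m + (i - pvIdx t i)) (if i > 0 then pvIdx t i else i)
    else i

def overLappedStringLength (s1 : String) (s2 : String) : Int :=
  let l1 := s1.toList
  let l2 := s2.toList
  let a := if l1.length > l2.length then PySem.List.slice l1 (some ((l1.length : Int) - (l2.length : Int))) none else l1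
  let t := computeBackTrackTable l2
  pvKmpLoop a l2 t (2 * a.length + 1) 0 0

-- ===== PORT B =====
def pvMatch (a b : List Char) (off L : Nat) : Bool :=
  (List.range L).all fun j => a.getD (off + j) ' ' == b.getD j ' '

def pvBLoop (a b : List Char) (n : Nat) : Nat → Int
  | 0 => 0
  | L+1 => if pvMatch a b (n - (L+1)) (L+1) then ((L+1 : Nat) : Int) else pvBLoop a b n L

def overLappedStringLength_alt (s1 : String) (s2 : String) : Int :=
  let l1 := s1.toList
  let l2 := s2.toList
  let a := if l1.length > l2.length then PySem.List.slice l1 (some ((l1.length : Int) - (l2.length : Int))) none else l1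
  pvBLoop a l2 a.length a.length

-- ===== PRECONDITION & SPEC =====
def Spec_overLappedStringLength (s1 : String) (s2 : String) (out : Int) : Prop := out = overLappedStringLength_alt s1 s2
instance (s1 : String) (s2 : String) (out : Int) : Decidable (Spec_overLappedStringLength s1 s2 out) := by unfold Spec_overLappedStringLength; infer_instance

-- ===== CLAIM (what is proved, stated in full; the proofs are below) =====
def Claim_equal_overLappedStringLength : Prop := ∀ (s1 : String) (s2 : String), Dom_overLappedStringLength s1 s2 → Spec_overLappedStringLength s1 s2 (overLappedStringLength s1 s2)

-- ===== LEMMAS AND PROOFS =====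

def IsBorder (l : List Char) (p : Nat) : Prop :=
  p < l.length ∧ ∀ j, j < p → l.getD j ' ' = l.getD (l.length - p + j) ' '

-- Bool form of IsBorder (no custom Decidable instance is declared in this file)
def IsBorderB (l : List Char) (p : Nat) : Bool :=
  decide (p < l.length ∧ ∀ j, j < p → l.getD j ' ' = l.getD (l.length - p + j) ' ')

theorem isBorderB_iff {l : List Char} {p : Nat} : IsBorderB l p = true ↔ IsBorder l p := by
  simp [IsBorderB, IsBorder]

def Brd (l : List Char) : Nat := Nat.findGreatest (fun p => IsBorderB l p = true) (l.length - 1)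

theorem getD_take {α : Type} (l : List α) (d : α) {m j : Nat} (h : j < m) :
    (l.take m).getD j d = l.getD j d := by
  simp [List.getD, h]

theorem isBorder_zero {l : List Char} (h : l ≠ []) : IsBorder l 0 :=
  ⟨List.length_pos_of_ne_nil h, by omega⟩

theorem brd_isBorder {l : List Char} (h : l ≠ []) : IsBorder l (Brd l) :=
  isBorderB_iff.mp (Nat.findGreatest_spec (P := fun p => IsBorderB l p = true) (m := 0) (Nat.zero_le _) (isBorderB_iff.mpr (isBorder_zero h)))

theorem brd_max {l : List Char} {q : Nat} (h : IsBorder l q) : q ≤ Brd l :=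
  Nat.le_findGreatest (by have := h.1; omega) (isBorderB_iff.mpr h)

theorem isBorder_take_iff {b : List Char} {m p : Nat} (hm : m ≤ b.length) :
    IsBorder (b.take m) p ↔ p < m ∧ ∀ j, j < p → b.getD j ' ' = b.getD (m - p + j) ' ' := by
  unfold IsBorder
  rw [List.length_take]
  constructor
  · rintro ⟨h1, h2⟩
    refine ⟨by omega, fun j hj => ?_⟩
    have := h2 j hj
    rwa [getD_take _ _ (by omega), getD_take _ _ (by omega), Nat.min_eq_left hm] at this
  · rintro ⟨h1, h2⟩
    refine ⟨by omega, fun j hj => ?_⟩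
    rw [getD_take _ _ (by omega), getD_take _ _ (by omega), Nat.min_eq_left hm]
    exact h2 j hj

theorem border_trans {b : List Char} {m c r : Nat} (hm : m ≤ b.length)
    (hc : IsBorder (b.take m) c) (hr : IsBorder (b.take c) r) : IsBorder (b.take m) r := by
  rw [isBorder_take_iff hm] at hc ⊢
  rw [isBorder_take_iff (by omega)] at hr
  obtain ⟨hc1, hc2⟩ := hc
  obtain ⟨hr1, hr2⟩ := hr
  refine ⟨by omega, fun j hj => ?_⟩
  rw [hr2 j hj]
  have := hc2 (c - r + j) (by omega)
  rw [this]
  congr 1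
  omega

theorem border_nested {b : List Char} {m q r : Nat} (hm : m ≤ b.length)
    (hq : IsBorder (b.take m) q) (hr : IsBorder (b.take m) r) (hrq : r < q) :
    IsBorder (b.take q) r := by
  rw [isBorder_take_iff hm] at hq hr
  rw [isBorder_take_iff (by omega)]
  obtain ⟨hq1, hq2⟩ := hq
  obtain ⟨hr1, hr2⟩ := hr
  refine ⟨hrq, fun j hj => ?_⟩
  rw [hr2 j hj]
  have := hq2 (q - r + j) (by omega)
  rw [show m - q + (q - r + j) = m - r + j by omega] at this
  exact this.symm

theorem border_extend {b : List Char} {pos q : Nat} (h2 : 2 ≤ pos) (hp : pos ≤ b.length) (hq : 1 ≤ q) :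
    IsBorder (b.take pos) q ↔
      IsBorder (b.take (pos - 1)) (q - 1) ∧ b.getD (q - 1) ' ' = b.getD (pos - 1) ' ' := by
  rw [isBorder_take_iff hp, isBorder_take_iff (by omega)]
  constructor
  · rintro ⟨h1, hAll⟩
    refine ⟨⟨by omega, fun j hj => ?_⟩, ?_⟩
    · have := hAll j (by omega)
      rwa [show pos - q + j = pos - 1 - (q - 1) + j by omega] at this
    · have := hAll (q - 1) (by omega)
      rwa [show pos - q + (q - 1) = pos - 1 by omega] at this
  · rintro ⟨⟨h1, hAll⟩, hlast⟩
    refine ⟨by omega, fun j hj => ?_⟩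
    rcases Nat.lt_or_ge j (q - 1) with hj' | hj'
    · have := hAll j hj'
      rwa [show pos - 1 - (q - 1) + j = pos - q + j by omega] at this
    · have hje : j = q - 1 := by omega
      subst hje
      rwa [show pos - q + (q - 1) = pos - 1 by omega]


theorem take_ne_nil {b : List Char} {pos : Nat} (h1 : 1 ≤ pos) (hp : pos ≤ b.length) :
    b.take pos ≠ [] := by
  intro hnil
  rcases List.take_eq_nil_iff.mp hnil with h | h
  · omega
  · rw [h] at hp; simp at hp; omega

theorem brd_le {b : List Char} {m : Nat} (hm : m ≤ b.length) : Brd (b.take m) ≤ m - 1 := by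
  have := Nat.findGreatest_le (P := fun p => IsBorderB (b.take m) p = true) ((b.take m).length - 1)
  unfold Brd
  simp only [List.length_take] at this ⊢
  omega

theorem brd_take_one (b : List Char) : Brd (b.take 1) = 0 := by
  have := brd_le (b := b) (m := min 1 b.length) (by omega)
  rcases Nat.lt_or_ge b.length 1 with h | h
  · interval_cases hb : b.length <;> simp_all [Brd]
  · simpa [Nat.min_eq_left h] using brd_le (b := b) (m := 1) h

theorem brd_match {b : List Char} {pos c : Nat} (h2 : 2 ≤ pos) (hp : pos ≤ b.length)
    (hc : IsBorder (b.take (pos - 1)) c)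
    (hmax : ∀ q, IsBorder (b.take (pos - 1)) q → c < q → b.getD q ' ' ≠ b.getD (pos - 1) ' ')
    (heq : b.getD (pos - 1) ' ' = b.getD c ' ') : Brd (b.take pos) = c + 1 := by
  have hcb : IsBorder (b.take pos) (c + 1) := by
    rw [border_extend h2 hp (by omega)]
    exact ⟨by simpa using hc, by simpa using heq.symm⟩
  have hub : Brd (b.take pos) ≤ c + 1 := by
    have hBb : IsBorder (b.take pos) (Brd (b.take pos)) := by
      exact brd_isBorder (take_ne_nil (by omega) hp)
    by_contra hlt
    have h1 : 1 ≤ Brd (b.take pos) := by omega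
    rw [border_extend h2 hp h1] at hBb
    exact hmax _ hBb.1 (by omega) hBb.2
  exact le_antisymm hub (brd_max hcb)

theorem brd_mismatch_zero {b : List Char} {pos : Nat} (h2 : 2 ≤ pos) (hp : pos ≤ b.length)
    (hmax : ∀ q, IsBorder (b.take (pos - 1)) q → 0 < q → b.getD q ' ' ≠ b.getD (pos - 1) ' ')
    (hne : b.getD (pos - 1) ' ' ≠ b.getD 0 ' ') : Brd (b.take pos) = 0 := by
  have hBb : IsBorder (b.take pos) (Brd (b.take pos)) := by
    exact brd_isBorder (take_ne_nil (by omega) hp)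
  by_contra hlt
  have h1 : 1 ≤ Brd (b.take pos) := by omega
  rw [border_extend h2 hp h1] at hBb
  rcases Nat.eq_zero_or_pos (Brd (b.take pos) - 1) with h0 | h0
  · rw [h0] at hBb
    exact hne hBb.2.symm
  · exact hmax _ hBb.1 h0 hBb.2

def specTbl (b : List Char) : List Int :=
  (List.range (max 2 b.length)).map (fun j => if j = 0 then (-1 : Int) else (Brd (b.take j) : Int))

theorem pvIdx_natCast (t : List Int) (j : Nat) : pvIdx t (j : Int) = t.getD j 0 := by
  simp [pvIdx, List.getD]

theorem pvChr_natCast (s : List Char) (j : Nat) : pvChr s (j : Int) = s.getD j ' ' := by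
  simp [pvChr, List.getD]

theorem specTbl_length (b : List Char) : (specTbl b).length = max 2 b.length := by
  simp [specTbl]

theorem specTbl_getD {b : List Char} {j : Nat} (hj : j < max 2 b.length) :
    (specTbl b).getD j 0 = if j = 0 then (-1 : Int) else ((Brd (b.take j) : Nat) : Int) := by
  simp [specTbl, List.getD, hj]

theorem specTbl_take_two (b : List Char) : (specTbl b).take 2 = [-1, 0] := by
  have h : min 2 (max 2 b.length) = 2 := by omega
  simp [specTbl, ← List.map_take, List.take_range, List.range_succ, brd_take_one]

theorem tbl_inv (b : List Char) : ∀ (fuel c pos : Nat),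
    2 ≤ pos → pos ≤ b.length →
    IsBorder (b.take (pos - 1)) c →
    (∀ q, IsBorder (b.take (pos - 1)) q → c < q → b.getD q ' ' ≠ b.getD (pos - 1) ' ') →
    2 * (b.length - pos) + c + 1 ≤ fuel →
    pvTblLoop b fuel ((specTbl b).take pos) (c : Int) (pos : Int) = specTbl b := by
  intro fuel
  induction fuel with
  | zero => intro c pos _ _ _ _ hf; omega
  | succ fuel ih =>
    intro c pos h2 hp hc hmax hf
    have hLen : 2 ≤ b.length := by omega
    have hSpecLen : (specTbl b).length = b.length := by rw [specTbl_length]; omega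
    have hcpos : c < pos - 1 := hc.1.trans_le (by rw [List.length_take]; omega)
    rw [pvTblLoop]
    rcases Nat.lt_or_ge pos b.length with hlt | hge
    · rw [if_pos (by exact_mod_cast hlt)]
      have hchr1 : pvChr b ((pos : Int) - 1) = b.getD (pos - 1) ' ' := by
        rw [show ((pos : Int) - 1) = ((pos - 1 : Nat) : Int) by omega, pvChr_natCast]
      have htlen : ((specTbl b).take pos).length = pos := by
        rw [List.length_take]; omega
      have hspecpos : (specTbl b).getD pos 0 = ((Brd (b.take pos) : Nat) : Int) := by
        rw [specTbl_getD (by omega), if_neg (by omega)]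
      by_cases heq : pvChr b ((pos : Int) - 1) = pvChr b (c : Int)
      · -- match branch
        rw [if_pos heq]
        rw [hchr1, pvChr_natCast] at heq
        have hbrd : Brd (b.take pos) = c + 1 := brd_match h2 (by omega) hc hmax heq
        have hins : PySem.List.insert ((specTbl b).take pos) (pos : Int) ((c : Int) + 1)
            = (specTbl b).take (pos + 1) := by
          rw [PySem.List.insert_natCast _ pos _ (by omega)]
          rw [List.take_take, Nat.min_self, List.drop_of_length_le (le_of_eq htlen), List.take_add_one]
          congr 1
          rw [List.getElem?_eq_getElem (by omega)]
          have h1 : (specTbl b).getD pos 0 = (specTbl b)[pos] := by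
            rw [List.getD, List.getElem?_eq_getElem (by omega)]; rfl
          rw [← h1, hspecpos, hbrd]
          push_cast
          ring_nf
          rfl
        rw [hins]
        rw [show ((c : Int) + 1) = ((c + 1 : Nat) : Int) by push_cast; ring,
            show ((pos : Int) + 1) = ((pos + 1 : Nat) : Int) by push_cast; ring]
        apply ih
        · omega
        · omega
        · simpa using hbrd ▸ brd_isBorder (take_ne_nil (by omega) (by omega : pos ≤ b.length))
        · intro q hq hcq
          have := brd_max hq
          simp only [Nat.add_sub_cancel] at this ⊢
          intro _
          omega
        · omega
      · rw [if_neg heq]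
        rw [hchr1, pvChr_natCast] at heq
        by_cases hcpos0 : (c : Int) > 0
        · rw [if_pos hcpos0]
          have hc0 : 0 < c := by exact_mod_cast hcpos0
          have hcnil : b.take c ≠ [] := take_ne_nil (by omega) (by omega)
          have hidx : pvIdx ((specTbl b).take pos) (c : Int) = ((Brd (b.take c) : Nat) : Int) := by
            rw [pvIdx_natCast]
            rw [getD_take _ _ (by omega : c < pos), specTbl_getD (by omega), if_neg (by omega)]
          rw [hidx]
          apply ih
          · omega
          · omega
          · exact border_trans (by omega) hc (brd_isBorder hcnil)
          · intro q hq hgt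
            rcases Nat.lt_or_ge c q with hqc | hqc
            · rcases Nat.lt_or_ge q c with h' | h'
              · omega
              · rcases Nat.eq_or_lt_of_le h' with h'' | h''
                · subst h''; exact fun hEq => heq hEq.symm
                · exact hmax q hq hqc
            · rcases Nat.eq_or_lt_of_le hqc with h'' | h''
              · subst h''; exact fun hEq => heq hEq.symm
              · -- Brd (b.take c) < q < c : q is a border of b.take c, contradicting maximality
                exfalso
                have hqb : IsBorder (b.take c) q := border_nested (by omega) hc hq h''
                have := brd_max hqb
                omega
          · have hblt : Brd (b.take c) < c := by have := brd_le (b := b) (m := c) (by omega); omega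
            omega
        · rw [if_neg hcpos0]
          have hc0 : c = 0 := by omega
          subst hc0
          have hbrd : Brd (b.take pos) = 0 :=
            brd_mismatch_zero h2 (by omega) hmax heq
          have hins : PySem.List.insert ((specTbl b).take pos) (pos : Int) 0
              = (specTbl b).take (pos + 1) := by
            rw [PySem.List.insert_natCast _ pos _ (by omega)]
            rw [List.take_take, Nat.min_self, List.drop_of_length_le (le_of_eq htlen), List.take_add_one]
            congr 1
            rw [List.getElem?_eq_getElem (by omega)]
            have h1 : (specTbl b).getD pos 0 = (specTbl b)[pos] := by
              rw [List.getD, List.getElem?_eq_getElem (by omega)]; rfl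
            rw [← h1, hspecpos, hbrd]
            simp
          rw [hins]
          rw [show ((pos : Int) + 1) = ((pos + 1 : Nat) : Int) by push_cast; ring]
          apply ih
          · omega
          · omega
          · simpa using isBorder_zero (take_ne_nil (by omega) (by omega : pos ≤ b.length))
          · intro q hq hcq
            exfalso
            have := brd_max hq
            simp only [Nat.add_sub_cancel] at this
            omega
          · omega
    · -- pos = b.length : the loop exits, and take pos is the whole table
      rw [if_neg (by exact_mod_cast (by omega : ¬ ((pos : Int) < (b.length : Int))))]
      rw [List.take_of_length_le (by omega)]

theorem tbl_correct (b : List Char) : computeBackTrackTable b = specTbl b := by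
  unfold computeBackTrackTable
  have hinit : PySem.List.insert (PySem.List.insert ([] : List Int) 0 (-1)) 1 0 = [-1, 0] := by rfl
  rw [hinit]
  rcases Nat.lt_or_ge b.length 3 with h | h
  · have hmax : max 2 b.length = 2 := by omega
    have hspec : specTbl b = [-1, 0] := by
      simp [specTbl, hmax, List.range_succ, brd_take_one]
    rw [hspec]
    rw [pvTblLoop]
    rw [if_neg (by exact_mod_cast (by omega : ¬ ((2:Int) < (b.length : Int))))]
  · have h0 : ([-1, 0] : List Int) = (specTbl b).take 2 := (specTbl_take_two b).symm
    rw [h0, show ((0 : Int)) = ((0 : Nat) : Int) by norm_num,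
        show ((2 : Int)) = ((2 : Nat) : Int) by norm_num]
    apply tbl_inv
    · omega
    · omega
    · exact isBorder_zero (take_ne_nil (by omega) (by omega))
    · intro q hq h0q
      intro _
      have hlen := hq.1
      rw [List.length_take] at hlen
      omega
    · omega

def Ov (a b : List Char) (k : Nat) : Prop :=
  ∀ j, j < a.length - k → a.getD (k + j) ' ' = b.getD j ' '

-- Bool form of Ov (no custom Decidable instance is declared in this file)
def OvB (a b : List Char) (k : Nat) : Bool :=
  decide (∀ j, j < a.length - k → a.getD (k + j) ' ' = b.getD j ' ')

theorem ovB_iff {a b : List Char} {k : Nat} : OvB a b k = true ↔ Ov a b k := by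
  simp [OvB, Ov]

theorem ov_length (a b : List Char) : Ov a b a.length := by
  intro j hj; omega

def kMin (a b : List Char) : Nat :=
  Nat.find ⟨a.length, ovB_iff.mpr (ov_length a b)⟩ (p := fun k => OvB a b k = true)

theorem kMin_le (a b : List Char) : kMin a b ≤ a.length :=
  Nat.find_le (ovB_iff.mpr (ov_length a b))

theorem kmp_loop_eq (a b : List Char) (hab : a.length ≤ b.length) :
    ∀ (fuel m i : Nat), m + i ≤ a.length →
      (∀ j, j < i → a.getD (m + j) ' ' = b.getD j ' ') →
      (∀ k, k < m → ¬ Ov a b k) →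
      2 * a.length + 1 ≤ 2 * m + i + fuel →
      pvKmpLoop a b (specTbl b) fuel (m : Int) (i : Int) = ((a.length - kMin a b : Nat) : Int) := by
  intro fuel
  induction fuel with
  | zero => intro m i _ _ _ hf; omega
  | succ fuel ih =>
    intro m i hmi hmatch hmin hf
    rw [pvKmpLoop]
    rcases Nat.lt_or_ge (m + i) a.length with hlt | hge
    · rw [if_pos (by exact_mod_cast hlt)]
      have hchr : pvChr a ((m : Int) + (i : Int)) = a.getD (m + i) ' ' := by
        rw [show ((m : Int) + (i : Int)) = ((m + i : Nat) : Int) by push_cast; ring, pvChr_natCast]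
      by_cases heq : pvChr b (i : Int) = pvChr a ((m : Int) + (i : Int))
      · rw [if_pos heq]
        rw [hchr, pvChr_natCast] at heq
        rw [show ((i : Int) + 1) = ((i + 1 : Nat) : Int) by push_cast; ring]
        apply ih m (i + 1) (by omega)
        · intro j hj
          rcases Nat.lt_or_ge j i with h' | h'
          · exact hmatch j h'
          · have : j = i := by omega
            subst this
            exact heq.symm
        · exact hmin
        · omega
      · rw [if_neg heq]
        rw [hchr, pvChr_natCast] at heq
        rcases Nat.eq_zero_or_pos i with hi0 | hi0
        · subst hi0
          have ht0 : pvIdx (specTbl b) ((0 : Nat) : Int) = -1 := by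
            rw [pvIdx_natCast, specTbl_getD (by omega), if_pos rfl]
          rw [show ((0:Nat):Int) = (0:Int) by norm_num] at ht0 ⊢
          rw [ht0]
          rw [if_neg (by norm_num)]
          rw [show ((m : Int) + (0 - (-1))) = ((m + 1 : Nat) : Int) by push_cast; ring]
          apply ih (m + 1) 0 (by omega)
          · intro j hj; omega
          · intro k hk
            rcases Nat.lt_or_ge k m with h' | h'
            · exact hmin k h'
            · have hkm : k = m := by omega
              subst hkm
              intro hov
              have := hov 0 (by omega)
              simp at this heq
              exact heq (this.symm)
          · omega
        · -- i ≥ 1 : consult the table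
          have hiblen : i < b.length := by omega
          have hinb : i ≤ b.length := by omega
          set p := Brd (b.take i) with hp
          have hpi : p < i := by have := brd_le (b := b) (m := i) hinb; omega
          have hpb : IsBorder (b.take i) p := brd_isBorder (take_ne_nil (by omega) hinb)
          have hidx : pvIdx (specTbl b) (i : Int) = ((p : Nat) : Int) := by
            rw [pvIdx_natCast, specTbl_getD (by omega), if_neg (by omega)]
          rw [hidx, if_pos (by exact_mod_cast hi0)]
          rw [show ((m : Int) + ((i : Int) - ((p : Nat) : Int))) = ((m + (i - p) : Nat) : Int) by push_cast [Nat.sub_add_cancel]; omega]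
          apply ih (m + (i - p)) p (by omega)
          · -- matched part survives the shift, via the border property
            intro j hj
            rw [isBorder_take_iff hinb] at hpb
            have hb1 : b.getD j ' ' = b.getD (i - p + j) ' ' := hpb.2 j hj
            have ha1 : a.getD (m + (i - p + j)) ' ' = b.getD (i - p + j) ' ' :=
              hmatch (i - p + j) (by omega)
            rw [show m + (i - p) + j = m + (i - p + j) by omega, ha1, ← hb1]
          · -- no start in [m, m + (i - p)) admits a full match
            intro k hk
            rcases Nat.lt_or_ge k m with h' | h'
            · exact hmin k h'
            · intro hov
              rcases Nat.eq_or_lt_of_le h' with hkm | hkm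
              · -- k = m : the mismatched character refutes it
                subst hkm
                have := hov i (by omega)
                exact heq this.symm
              · -- m < k : a border of b.take i longer than p would exist
                have hq : IsBorder (b.take i) (m + i - k) := by
                  rw [isBorder_take_iff hinb]
                  refine ⟨by omega, fun j hj => ?_⟩
                  have h1 : a.getD (k + j) ' ' = b.getD j ' ' := hov j (by omega)
                  have h2 : a.getD (m + (k - m + j)) ' ' = b.getD (k - m + j) ' ' :=
                    hmatch (k - m + j) (by omega)
                  rw [show m + (k - m + j) = k + j by omega] at h2
                  rw [← h1, h2]
                  congr 1
                  omega
                have := brd_max hq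
                omega
          · omega
    · rw [if_neg (by exact_mod_cast (by omega : ¬ ((m : Int) + (i : Int) < (a.length : Int))))]
      have hieq : m + i = a.length := by omega
      have hovm : Ov a b m := by
        intro j hj
        exact hmatch j (by omega)
      have hkm : kMin a b = m := by
        have h1 : kMin a b ≤ m := Nat.find_le (ovB_iff.mpr hovm)
        have h2 : ¬ kMin a b < m :=
          fun h => hmin _ h (ovB_iff.mp (Nat.find_spec (p := fun k => OvB a b k = true) ⟨a.length, ovB_iff.mpr (ov_length a b)⟩))
        omega
      rw [hkm]
      omega

theorem pvMatch_iff {a b : List Char} {L : Nat} (hL : L ≤ a.length) :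
    pvMatch a b (a.length - L) L = true ↔ Ov a b (a.length - L) := by
  unfold pvMatch Ov
  rw [List.all_eq_true]
  constructor
  · intro h j hj
    have := h j (List.mem_range.mpr (by omega))
    exact beq_iff_eq.mp (by simpa using this)
  · intro h j hj
    have hj' := List.mem_range.mp hj
    simpa using beq_iff_eq.mpr (h j (by omega))

theorem bloop_eq (a b : List Char) :
    ∀ L, L ≤ a.length → a.length - L ≤ kMin a b →
      pvBLoop a b a.length L = ((a.length - kMin a b : Nat) : Int) := by
  intro L
  induction L with
  | zero =>
    intro _ hk
    have := kMin_le a b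
    rw [pvBLoop]
    have : a.length - kMin a b = 0 := by omega
    rw [this]
    norm_num
  | succ L ih =>
    intro hL hk
    rw [pvBLoop]
    by_cases hm : pvMatch a b (a.length - (L+1)) (L+1) = true
    · rw [if_pos hm]
      have hov := (pvMatch_iff hL).mp hm
      have h1 : kMin a b ≤ a.length - (L+1) := Nat.find_le (ovB_iff.mpr hov)
      have : a.length - kMin a b = L + 1 := by omega
      rw [this]
    · rw [if_neg hm]
      apply ih (by omega)
      have hne : kMin a b ≠ a.length - (L+1) := by
        intro hEq
        exact hm ((pvMatch_iff hL).mpr (hEq ▸ ovB_iff.mp (Nat.find_spec (p := fun k => OvB a b k = true) ⟨a.length, ovB_iff.mpr (ov_length a b)⟩)))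
      omega

theorem ports_eq (a b : List Char) (hab : a.length ≤ b.length) :
    pvKmpLoop a b (computeBackTrackTable b) (2 * a.length + 1) 0 0 = pvBLoop a b a.length a.length := by
  rw [tbl_correct]
  rw [show (0 : Int) = ((0 : Nat) : Int) by norm_num]
  rw [kmp_loop_eq a b hab (2 * a.length + 1) 0 0 (by omega) (by omega) (by omega) (by omega)]
  rw [bloop_eq a b a.length le_rfl (by omega)]

theorem truncated_le (l1 l2 : List Char) :
    (if l1.length > l2.length then PySem.List.slice l1 (some ((l1.length : Int) - (l2.length : Int))) none else l1).length ≤ l2.length := by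
  by_cases h : l1.length > l2.length
  · rw [if_pos h]
    rw [show ((l1.length : Int) - (l2.length : Int)) = ((l1.length - l2.length : Nat) : Int) by omega]
    rw [PySem.List.slice_from_natCast]
    rw [List.length_drop]
    omega
  · rw [if_neg h]
    omega

-- ===== VERDICT (by name: the statement is the Claim_ definition above) =====
theorem overLappedStringLength_spec : Claim_equal_overLappedStringLength := by
  intro s1 s2 _
  unfold Spec_overLappedStringLength overLappedStringLength overLappedStringLength_alt
  exact ports_eq _ _ (truncated_le s1.toList s2.toList)
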